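-- pv_equiv track=rewrite | github.com/Divyae52/TCAWCodeLinks | 15.py | isReluctant
-- ===== SOURCE A (Python) =====
-- def respondReluctant(playerMove):
--     # input: the player's most recent move
--     # output: the computer's best response if the player will not repeat
--
--     if playerMove == "ROCK":
--         return ("SCISSORS")
--     if playerMove == "SCISSORS":
--         return ("PAPER")
--     else:
--         return("ROCK")
--
-- def isReluctant (playerHistory):
--     # input: the player's full move history
--     # output: game results if the computer assumes this player is reluctant to repeat
--
--     outcome = 0
--     numGames = len(playerHistory)
--
--     for ctr in range(1, numGames):
--         playerChoice = playerHistory[ctr]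
--         computerChoice = respondReluctant(playerHistory[ctr-1])
--         outcome = outcome + calculateOutcome(playerChoice, computerChoice)
--
--     return(outcome)
--
-- def calculateOutcome (playerMove, computerMove):
--     # input: the moves this round
--     # output: 1 if the computer wins, -1 if the computer loses, 0 if tie
--
--     outcome = 0
--
--     if playerMove == "ROCK":
--         if computerMove == "SCISSORS":
--             outcome = -1
--         elif computerMove == "PAPER":
--             outcome = 1
--         else:
--             outcome = 0
--
--     if playerMove == "SCISSORS":
--         if computerMove == "PAPER":
--             outcome = -1
--         elif computerMove == "ROCK":
--             outcome = 1
--         else: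
--             outcome = 0
--
--     if playerMove == "PAPER":
--         if computerMove == "ROCK":
--             outcome = -1
--         elif computerMove == "SCISSORS":
--             outcome = 1
--         else:
--             outcome = 0
--
--     return (outcome)
-- ===== SOURCE B (Python) =====
-- # Staged rewrite: build the computer's reply list, pair replies with the next move,
-- # then count each winning/losing round pattern and return wins minus losses.
-- def isReluctant(playerHistory):
--     replies = ["SCISSORS" if m == "ROCK" else "PAPER" if m == "SCISSORS" else "ROCK"
--                for m in playerHistory[:-1]]
--     rounds = list(zip(playerHistory[1:], replies))
--     wins = (rounds.count(("PAPER", "SCISSORS"))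
--             + rounds.count(("ROCK", "PAPER"))
--             + rounds.count(("SCISSORS", "ROCK")))
--     losses = (rounds.count(("ROCK", "SCISSORS"))
--               + rounds.count(("SCISSORS", "PAPER"))
--               + rounds.count(("PAPER", "ROCK")))
--     return wins - losses
-- ===== Notes on version B (the rewrite author's own statement) =====
-- stated objective: alternative
-- what changed: Replaced A's single indexed loop that scores each consecutive round via two branch-heavy helpers with a staged pipeline: first build the computer's reply list, zip it with the next player moves, then count the occurrences of each of the six winning/losing round patterns and return wins minus losses (no per-round score is ever computed).
import Mathlib
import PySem

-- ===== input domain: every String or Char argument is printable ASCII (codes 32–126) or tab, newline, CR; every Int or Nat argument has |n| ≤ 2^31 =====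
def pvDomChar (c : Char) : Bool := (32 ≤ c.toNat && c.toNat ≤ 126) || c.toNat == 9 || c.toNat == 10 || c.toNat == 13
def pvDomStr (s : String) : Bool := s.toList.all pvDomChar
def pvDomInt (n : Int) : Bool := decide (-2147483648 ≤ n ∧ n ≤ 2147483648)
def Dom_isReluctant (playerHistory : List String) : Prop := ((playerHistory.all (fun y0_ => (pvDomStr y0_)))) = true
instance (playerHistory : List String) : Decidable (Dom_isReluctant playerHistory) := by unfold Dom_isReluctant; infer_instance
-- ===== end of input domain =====

-- B replaces A's single scoring loop with a staged pipeline: reply list, zip with next moves, then pattern counts (wins minus losses); objective: alternative, same cost.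


-- ===== PORT A =====
def respondReluctant (playerMove : String) : String :=
  if playerMove = "ROCK" then "SCISSORS"
  else if playerMove = "SCISSORS" then "PAPER"
  else "ROCK"

def calculateOutcome (playerMove : String) (computerMove : String) : Int :=
  let outcome : Int := 0
  let outcome : Int :=
    if playerMove = "ROCK" then
      (if computerMove = "SCISSORS" then -1 else if computerMove = "PAPER" then 1 else 0)
    else outcome
  let outcome : Int :=
    if playerMove = "SCISSORS" then
      (if computerMove = "PAPER" then -1 else if computerMove = "ROCK" then 1 else 0)
    else outcome
  let outcome : Int :=
    if playerMove = "PAPER" then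
      (if computerMove = "ROCK" then -1 else if computerMove = "SCISSORS" then 1 else 0)
    else outcome
  outcome

def isReluctant (playerHistory : List String) : Int :=
  let numGames : Int := (playerHistory.length : Int)
  (PySem.List.pyRange 1 numGames 1).foldl
    (fun outcome ctr =>
      let playerChoice := PySem.List.pyGetD playerHistory ctr ""
      let computerChoice := respondReluctant (PySem.List.pyGetD playerHistory (ctr - 1) "")
      outcome + calculateOutcome playerChoice computerChoice) 0

-- ===== PORT B =====
def isReluctant_alt (playerHistory : List String) : Int :=
  let replies := (PySem.List.slice playerHistory none (some (-1))).map
    (fun m => if m = "ROCK" then "SCISSORS" else if m = "SCISSORS" then "PAPER" else "ROCK")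
  let rounds := (PySem.List.slice playerHistory (some 1) none).zip replies
  let wins : Int :=
    (PySem.List.count rounds ("PAPER", "SCISSORS") : Int)
    + (PySem.List.count rounds ("ROCK", "PAPER") : Int)
    + (PySem.List.count rounds ("SCISSORS", "ROCK") : Int)
  let losses : Int :=
    (PySem.List.count rounds ("ROCK", "SCISSORS") : Int)
    + (PySem.List.count rounds ("SCISSORS", "PAPER") : Int)
    + (PySem.List.count rounds ("PAPER", "ROCK") : Int)
  wins - losses

-- ===== PRECONDITION & SPEC =====
def Spec_isReluctant (playerHistory : List String) (out : Int) : Prop := out = isReluctant_alt playerHistory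
instance (playerHistory : List String) (out : Int) : Decidable (Spec_isReluctant playerHistory out) := by unfold Spec_isReluctant; infer_instance

-- ===== CLAIM (what is proved, stated in full; the proofs are below) =====
def Claim_equal_isReluctant : Prop := ∀ (playerHistory : List String), Dom_isReluctant playerHistory → Spec_isReluctant playerHistory (isReluctant playerHistory)

-- ===== LEMMAS AND PROOFS =====

-- signed indicator of the six scoring round patterns
def pvInd (pc : String × String) : Int :=
  (if pc = ("PAPER", "SCISSORS") then 1 else 0)
  + (if pc = ("ROCK", "PAPER") then 1 else 0)
  + (if pc = ("SCISSORS", "ROCK") then 1 else 0)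
  - (if pc = ("ROCK", "SCISSORS") then 1 else 0)
  - (if pc = ("SCISSORS", "PAPER") then 1 else 0)
  - (if pc = ("PAPER", "ROCK") then 1 else 0)

-- the pattern-count difference is the sum of signed indicators
lemma countsum (rs : List (String × String)) :
    ((rs.count ("PAPER", "SCISSORS") : Int) + (rs.count ("ROCK", "PAPER") : Int)
      + (rs.count ("SCISSORS", "ROCK") : Int))
    - ((rs.count ("ROCK", "SCISSORS") : Int) + (rs.count ("SCISSORS", "PAPER") : Int)
      + (rs.count ("PAPER", "ROCK") : Int))
    = (rs.map pvInd).sum := by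
  induction rs with
  | nil => simp
  | cons h t ih =>
    simp only [List.count_cons, List.map_cons, List.sum_cons, beq_iff_eq]
    push_cast
    rw [← ih]
    unfold pvInd
    split_ifs <;> simp_all <;> linarith

-- the signed indicator against a reply equals A's round score
lemma ind_reply (c p : String) :
    pvInd (c, respondReluctant p) = calculateOutcome c (respondReluctant p) := by
  unfold pvInd respondReluctant calculateOutcome
  by_cases h1 : c = "ROCK" <;> by_cases h2 : c = "SCISSORS" <;> by_cases h3 : c = "PAPER" <;>
    by_cases h4 : p = "ROCK" <;> by_cases h5 : p = "SCISSORS" <;> simp_all [Prod.ext_iff]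

-- A's index loop as a sum over positions 0..n-2
lemma portA_eq_range (xs : List String) :
    isReluctant xs
      = ((List.range (xs.length - 1)).map
          (fun k => calculateOutcome (xs.getD (k+1) "") (respondReluctant (xs.getD k "")))).sum := by
  unfold isReluctant
  dsimp only
  rw [PySem.List.pyRange_one, List.foldl_map, PySem.List.foldl_add, zero_add]
  congr 1
  have h1 : ((xs.length : Int) - 1).toNat = xs.length - 1 := by omega
  rw [h1]
  apply List.map_congr_left
  intro k _
  have h2 : (1 : Int) + (k : Int) = ((k + 1 : Nat) : Int) := by push_cast; ring
  rw [h2, show ((k + 1 : Nat) : Int) - 1 = ((k : Nat) : Int) by omega]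
  simp only [PySem.List.pyGetD_natCast]

-- B's rounds list written positionally
lemma rounds_eq_range (xs : List String) :
    (PySem.List.slice xs (some 1) none).zip
      ((PySem.List.slice xs none (some (-1))).map
        (fun m => if m = "ROCK" then "SCISSORS" else if m = "SCISSORS" then "PAPER" else "ROCK"))
      = (List.range (xs.length - 1)).map
          (fun k => (xs.getD (k+1) "", respondReluctant (xs.getD k ""))) := by
  rw [PySem.List.slice_from_one, PySem.List.slice_to_neg_one]
  apply List.ext_getElem
  · simp [List.length_zip, List.length_dropLast]
  · intro k hk hk'
    simp only [List.length_zip, List.length_tail, List.length_map, List.length_dropLast,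
      min_self] at hk
    have hlen : k + 1 < xs.length := by omega
    simp only [List.getElem_zip, List.getElem_map, List.getElem_range, List.getElem_tail,
      List.getElem_dropLast]
    rw [List.getD_eq_getElem _ _ hlen, List.getD_eq_getElem _ _ (Nat.lt_of_succ_lt hlen)]
    rfl

-- ===== VERDICT (by name: the statement is the Claim_ definition above) =====
theorem isReluctant_spec : Claim_equal_isReluctant := by
  intro xs _
  unfold Spec_isReluctant isReluctant_alt
  dsimp only
  simp only [PySem.List.count_eq]
  rw [countsum, rounds_eq_range, portA_eq_range, List.map_map]
  congr 1
  apply List.map_congr_left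
  intro k _
  simp only [Function.comp_apply]
  exact (ind_reply _ _).symm
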